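-- pv_equiv track=rewrite | github.com/omeravrech/DevSecOps12 | HangingMan/hangingman.py | index_char_in_sentence
-- ===== SOURCE A (Python) =====
-- def is_sentence(sentence: list | None = None):
--     """
--     Verify if the list i a valid sentences who build from words
--     :param sentence:
--     :return: True\False
--     """
--     if type(sentence) != list:
--         return False
--
--     for word in sentence:
--         if type(word) != str:
--             return False
--
--     s = " ".join(sentence)
--     for char in s:
--         if char.isdigit():
--             return False
--
--     return True
--
-- def is_char(char: str | None = None):
--     return type(char) == str and len(char) == 1 and char.isalpha()
--
-- def index_char_in_sentence(sentence: list | None = None, char: str | None = None):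
--     if not is_sentence(sentence) or not is_char(char):
--         return None
--
--     indexes = []
--     s = " ".join(sentence)
--     for i in range(len(s)):
--         if s[i].lower() == char:
--             indexes.append(i)
--     return indexes
-- ===== SOURCE B (Python) =====
-- def index_char_in_sentence(sentence: list | None = None, char: str | None = None):
--     if type(sentence) != list or any(type(w) != str for w in sentence):
--         return None
--     s = " ".join(sentence)
--     if any(c.isdigit() for c in s):
--         return None
--     if not (type(char) == str and len(char) == 1 and char.isalpha()):
--         return None
--     low = s.lower()
--     indexes = []
--     start = 0
--     while True:
--         i = low.find(char, start)
--         if i == -1: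
--             return indexes
--         indexes.append(i)
--         start = i + 1
-- ===== Notes on version B (the rewrite author's own statement) =====
-- stated objective: idiomatic
-- what changed: B lowercases the joined sentence once and collects match positions with repeated str.find(char, start) jumps instead of A's index-by-index scan comparing s[i].lower() to char.
import Mathlib
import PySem

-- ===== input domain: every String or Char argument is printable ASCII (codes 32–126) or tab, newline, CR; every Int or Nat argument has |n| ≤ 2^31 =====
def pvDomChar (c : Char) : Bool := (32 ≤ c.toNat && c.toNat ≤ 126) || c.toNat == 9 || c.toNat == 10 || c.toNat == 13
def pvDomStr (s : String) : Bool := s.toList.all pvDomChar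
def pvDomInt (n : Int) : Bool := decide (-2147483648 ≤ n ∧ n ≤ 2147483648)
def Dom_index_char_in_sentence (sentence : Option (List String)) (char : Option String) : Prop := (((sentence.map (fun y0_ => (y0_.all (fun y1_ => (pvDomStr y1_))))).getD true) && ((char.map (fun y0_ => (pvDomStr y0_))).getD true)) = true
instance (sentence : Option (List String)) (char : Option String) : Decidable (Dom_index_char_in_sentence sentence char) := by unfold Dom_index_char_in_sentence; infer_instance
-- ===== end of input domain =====

-- B collects the match positions with repeated str.find(char, start) jumps over the
-- once-lowercased joined sentence, instead of A's per-index scan lowering each character.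
-- (idiomatic; same O(n) cost)

-- ===== PORT A =====
-- is_sentence: the 'type(word) != str' loop can never fire under the type convention
-- (every element IS a String), so only the digit scan remains.
def isSentenceA : Option (List String) → Bool
  | none => false
  | some ws =>
    let s := PySem.Chars.join [' '] (ws.map String.toList)
    !(s.any PySem.Chars.isdigit)

def isCharA : Option String → Bool
  | none => false
  | some c => (PySem.Str.len c == 1) && PySem.Str.strIsalpha c

def index_char_in_sentence (sentence : Option (List String)) (char : Option String) : Option (List Int) :=
  if !(isSentenceA sentence) || !(isCharA char) then none
  else
    let ws := sentence.getD []
    let s := PySem.Chars.join [' '] (ws.map String.toList)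
    let cl := (char.getD "").toList
    some ((PySem.List.pyRange 0 s.length 1).foldl
      (fun acc i =>
        if [PySem.Chars.lowerChar (PySem.List.pyGetD s i ' ')] == cl then acc ++ [i] else acc) [])

-- ===== PORT B =====
-- start ≤ low.length whenever find returns a hit (needed for termination of the find loop)
theorem findFrom_start_le (low sub : List Char) (start : Nat)
    (h : PySem.Chars.findFrom low sub (start : Int) none ≠ -1) : start ≤ low.length := by
  by_contra hlt
  apply h
  simp only [PySem.Chars.findFrom]
  have h1 : ¬ ((start : Int) < 0) := by omega
  have h2 : (low.length : Int) < (start : Int) := by omega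
  simp [h1, h2]

-- the while-True / low.find(char, start) loop of B
def altLoop (low sub : List Char) (start : Nat) (acc : List Int) : List Int :=
  let i := PySem.Chars.findFrom low sub (start : Int) none
  if h : i = -1 then acc
  else
    have hle : start ≤ low.length := findFrom_start_le low sub start h
    have hsi : (start : Int) ≤ i :=
      (PySem.Chars.findFrom_natCast_spec low sub start hle h).1
    have : low.length + 1 - (i.toNat + 1) < low.length + 1 - start := by omega
    altLoop low sub (i.toNat + 1) (acc ++ [i])
termination_by low.length + 1 - start
decreasing_by exact this

def index_char_in_sentence_alt (sentence : Option (List String)) (char : Option String) : Option (List Int) :=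
  match sentence with
  | none => none
  | some ws =>
    let s := PySem.Chars.join [' '] (ws.map String.toList)
    if s.any PySem.Chars.isdigit then none
    else
      match char with
      | none => none
      | some c =>
        if !((PySem.Str.len c == 1) && PySem.Str.strIsalpha c) then none
        else
          let low := PySem.Chars.lower s
          some (altLoop low c.toList 0 [])

-- ===== PRECONDITION & SPEC =====
def Spec_index_char_in_sentence (sentence : Option (List String)) (char : Option String) (out : Option (List Int)) : Prop := out = index_char_in_sentence_alt sentence char
instance (sentence : Option (List String)) (char : Option String) (out : Option (List Int)) : Decidable (Spec_index_char_in_sentence sentence char out) := by unfold Spec_index_char_in_sentence; infer_instance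

-- ===== CLAIM (what is proved, stated in full; the proofs are below) =====
def Claim_equal_index_char_in_sentence : Prop := ∀ (sentence : Option (List String)) (char : Option String), Dom_index_char_in_sentence sentence char → Spec_index_char_in_sentence sentence char (index_char_in_sentence sentence char)

-- ===== LEMMAS AND PROOFS =====

-- [c] is a prefix of l.drop j exactly when l[j] = c
theorem singleton_prefix_drop (l : List Char) (j : Nat) (c : Char) :
    [c] <+: l.drop j ↔ l[j]? = some c := by
  rw [← List.head?_drop]
  cases l.drop j with
  | nil => simp
  | cons a t => simp [List.cons_prefix_cons, eq_comm]

-- the indices ≥ start at which low holds c, in increasing order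
def hits (low : List Char) (c : Char) (start : Nat) : List Int :=
  (PySem.List.pyRange (start : Int) (low.length : Int) 1).filter
    (fun i => PySem.List.pyGetD low i ' ' == c)

theorem hits_eq_nil (low : List Char) (c : Char) (start : Nat)
    (h : ∀ j : Nat, start ≤ j → low[j]? ≠ some c) : hits low c start = [] := by
  unfold hits
  rw [List.filter_eq_nil_iff]
  intro i hi
  rw [PySem.List.mem_pyRange_one] at hi
  have h0 : 0 ≤ i := by omega
  have hlt : i < (low.length : Int) := hi.2
  rw [PySem.List.pyGetD_eq_getElem low ' ' h0 hlt]
  have := h i.toNat (by omega)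
  simp only [beq_iff_eq]
  intro hc
  apply this
  rw [List.getElem?_eq_getElem (by omega)]
  exact congrArg some hc

theorem hits_cons (low : List Char) (c : Char) (start : Nat) (m : Nat)
    (hsm : start ≤ m) (hm : low[m]? = some c)
    (hmin : ∀ j : Nat, start ≤ j → j < m → low[j]? ≠ some c) :
    hits low c start = (m : Int) :: hits low c (m + 1) := by
  have hmlt : m < low.length := by
    by_contra hge
    rw [List.getElem?_eq_none (by omega)] at hm
    simp at hm
  unfold hits
  rw [PySem.List.pyRange_one_append (start : Int) (m : Int) (low.length : Int)
    (by omega) (by omega)]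
  rw [PySem.List.pyRange_one_cons (a := (m : Int)) (by omega)]
  rw [List.filter_append]
  have h1 : (PySem.List.pyRange (start : Int) (m : Int) 1).filter
      (fun i => PySem.List.pyGetD low i ' ' == c) = [] := by
    rw [List.filter_eq_nil_iff]
    intro i hi
    rw [PySem.List.mem_pyRange_one] at hi
    have h0 : 0 ≤ i := by omega
    rw [PySem.List.pyGetD_eq_getElem low ' ' h0 (by omega)]
    have := hmin i.toNat (by omega) (by omega)
    simp only [beq_iff_eq]
    intro hc
    apply this
    rw [List.getElem?_eq_getElem (by omega)]
    exact congrArg some hc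
  have h2 : PySem.List.pyGetD low (m : Int) ' ' = c := by
    rw [PySem.List.pyGetD_eq_getElem low ' ' (by omega) (by omega)]
    simpa [List.getElem?_eq_getElem hmlt] using hm
  have hcast : ((m : Int) + 1) = ((m + 1 : Nat) : Int) := by push_cast; ring
  rw [h1, List.nil_append, List.filter_cons_of_pos (by simp [h2]), hcast]

theorem altLoop_eq_hits (low : List Char) (c : Char) (start : Nat) (acc : List Int) :
    altLoop low [c] start acc = acc ++ hits low c start := by
  rw [altLoop]
  by_cases h : PySem.Chars.findFrom low [c] (start : Int) none = -1
  · simp only [h, dif_pos]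
    by_cases hle : start ≤ low.length
    · rw [PySem.Chars.findFrom_natCast_eq_neg_one_iff low [c] start hle] at h
      rw [hits_eq_nil low c start, List.append_nil]
      intro j hj hc
      apply h
      have h1 : [c] <+: low.drop j := (singleton_prefix_drop low j c).mpr hc
      have h2 : low.drop j <:+ low.drop start := by
        rw [show j = start + (j - start) from by omega, ← List.drop_drop]
        exact List.drop_suffix _ _
      exact h1.isInfix.trans h2.isInfix
    · rw [hits_eq_nil low c start, List.append_nil]
      intro j hj hc
      have : j < low.length := by
        by_contra hge
        rw [List.getElem?_eq_none (by omega)] at hc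
        simp at hc
      omega
  · simp only [h, dif_neg, not_false_iff]
    have hle : start ≤ low.length := findFrom_start_le low [c] start h
    obtain ⟨h1, h2, h3⟩ := PySem.Chars.findFrom_natCast_spec low [c] start hle h
    set i := PySem.Chars.findFrom low [c] (start : Int) none with hi
    rw [altLoop_eq_hits low c (i.toNat + 1) (acc ++ [i])]
    rw [singleton_prefix_drop] at h2
    have hcons : hits low c start = i :: hits low c (i.toNat + 1) := by
      have := hits_cons low c start i.toNat (by omega) h2
        (fun j hj hjlt hc => (h3 j hj hjlt) ((singleton_prefix_drop low j c).mpr hc))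
      rwa [Int.toNat_of_nonneg (by omega)] at this
    rw [hcons, List.append_assoc, List.singleton_append]
termination_by low.length + 1 - start
decreasing_by omega

-- ===== VERDICT (by name: the statement is the Claim_ definition above) =====
theorem index_char_in_sentence_spec : Claim_equal_index_char_in_sentence := by
  intro sentence char _
  unfold Spec_index_char_in_sentence index_char_in_sentence index_char_in_sentence_alt
  cases sentence with
  | none => rfl
  | some ws =>
    simp only [isSentenceA, Option.getD_some]
    set s := PySem.Chars.join [' '] (ws.map String.toList) with hs
    cases hd : s.any PySem.Chars.isdigit with
    | true => simp
    | false =>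
      cases char with
      | none => simp [isCharA]
      | some c =>
        simp only [isCharA, Option.getD_some]
        cases hc : ((PySem.Str.len c == 1) && PySem.Str.strIsalpha c) with
        | false => simp
        | true =>
          rw [if_neg (by simp), if_neg (by simp), if_neg (by simp)]
          have hlen : c.toList.length = 1 := by
            have := (Bool.and_eq_true _ _).mp hc |>.1
            rw [beq_iff_eq, PySem.Str.len_eq] at this
            omega
          obtain ⟨c₀, hc₀⟩ : ∃ c₀, c.toList = [c₀] := by
            cases h : c.toList with
            | nil => rw [h] at hlen; simp at hlen
            | cons a t =>
              rw [h] at hlen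
              simp at hlen
              exact ⟨a, by simp [hlen]⟩
          simp only [← hs]
          rw [PySem.List.foldl_append_if_eq_filter
            (fun i => [PySem.Chars.lowerChar (PySem.List.pyGetD s i ' ')] == c.toList)]
          rw [hc₀, altLoop_eq_hits (PySem.Chars.lower s) c₀ 0 []]
          simp only [List.nil_append, hits, PySem.Chars.lower, List.length_map,
            Nat.cast_zero]
          congr 1
          apply List.filter_congr
          intro i hi
          rw [PySem.List.mem_pyRange_one] at hi
          have h0 : 0 ≤ i := hi.1
          have hlt : i < (s.length : Int) := hi.2
          rw [PySem.List.pyGetD_eq_getElem s ' ' h0 hlt]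
          rw [PySem.List.pyGetD_eq_getElem (s.map PySem.Chars.lowerChar) ' ' h0
            (by simpa using hlt)]
          simp
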